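-- pv_equiv track=rewrite | github.com/yycdavid/program-synthesis-guided-RL | train_cvae.py | get_neighboring_states
-- ===== SOURCE A (Python) =====
-- def get_neighboring_states(pos, map_width, map_height, dist=1):
--     neighbors = set()
--     for a in range(-dist, dist + 1):
--         x = pos[0] + a
--         if x < 1 or x >= map_width - 1:
--             continue
--         for b in range(-dist, dist + 1):
--             y = pos[1] + b
--             if y < 1 or y >= map_height - 1:
--                 continue
--             neighbors.add((x, y))
--     return neighbors
-- ===== SOURCE B (Python) =====
-- def get_neighboring_states(pos, map_width, map_height, dist=1):
--     x0 = max(1, pos[0] - dist)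
--     y0 = max(1, pos[1] - dist)
--     nx = max(0, min(map_width - 2, pos[0] + dist) - x0 + 1)
--     ny = max(0, min(map_height - 2, pos[1] + dist) - y0 + 1)
--     return {(x0 + k // ny, y0 + k % ny) for k in range(nx * ny)}
-- ===== Notes on version B (the rewrite author's own statement) =====
-- stated objective: alternative
-- what changed: Replaces the nested offset scan with per-point bound checks by computing the clamped rectangle's origin and side lengths once and decoding a single flat index loop k in range(nx*ny) into coordinates with divmod arithmetic (k//ny, k%ny).
import Mathlib
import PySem

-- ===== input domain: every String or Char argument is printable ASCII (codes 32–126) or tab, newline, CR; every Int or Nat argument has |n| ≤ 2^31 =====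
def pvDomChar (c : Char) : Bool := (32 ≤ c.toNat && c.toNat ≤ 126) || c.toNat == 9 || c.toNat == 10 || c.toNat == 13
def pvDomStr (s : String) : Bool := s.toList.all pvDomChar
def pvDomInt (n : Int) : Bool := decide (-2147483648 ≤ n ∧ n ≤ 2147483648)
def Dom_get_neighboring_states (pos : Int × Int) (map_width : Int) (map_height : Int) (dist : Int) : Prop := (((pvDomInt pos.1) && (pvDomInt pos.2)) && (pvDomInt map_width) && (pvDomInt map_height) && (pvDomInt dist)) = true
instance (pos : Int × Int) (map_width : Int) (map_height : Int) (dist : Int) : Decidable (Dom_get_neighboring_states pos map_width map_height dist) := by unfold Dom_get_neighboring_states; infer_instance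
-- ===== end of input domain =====

-- B computes the clamped rectangle's origin and side lengths once and decodes a single flat
-- index loop over range(nx*ny) into coordinates with divmod arithmetic, instead of A's nested
-- offset scan with per-point bound checks (objective: alternative).

-- ===== PORT A =====
def get_neighboring_states (pos : Int × Int) (map_width : Int) (map_height : Int) (dist : Int) : List (Int × Int) :=
  (PySem.List.pyRange (-dist) (dist + 1) 1).foldl (fun neighbors a =>
    let x := pos.1 + a
    if x < 1 ∨ map_width - 1 ≤ x then neighbors
    else
      (PySem.List.pyRange (-dist) (dist + 1) 1).foldl (fun neighbors b =>
        let y := pos.2 + b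
        if y < 1 ∨ map_height - 1 ≤ y then neighbors
        else PySem.Set.add neighbors (x, y)) neighbors) PySem.Set.empty

-- ===== PORT B =====
def get_neighboring_states_alt (pos : Int × Int) (map_width : Int) (map_height : Int) (dist : Int) : List (Int × Int) :=
  let x0 := max 1 (pos.1 - dist)
  let y0 := max 1 (pos.2 - dist)
  let nx := max 0 (min (map_width - 2) (pos.1 + dist) - x0 + 1)
  let ny := max 0 (min (map_height - 2) (pos.2 + dist) - y0 + 1)
  PySem.Set.ofList ((PySem.List.pyRange 0 (nx * ny) 1).map
    (fun k => (x0 + PySem.Int.floordiv k ny, y0 + PySem.Int.mod k ny)))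

-- ===== PRECONDITION & SPEC =====
def Spec_get_neighboring_states (pos : Int × Int) (map_width : Int) (map_height : Int) (dist : Int) (out : List (Int × Int)) : Prop := out = get_neighboring_states_alt pos map_width map_height dist
instance (pos : Int × Int) (map_width : Int) (map_height : Int) (dist : Int) (out : List (Int × Int)) : Decidable (Spec_get_neighboring_states pos map_width map_height dist out) := by unfold Spec_get_neighboring_states; infer_instance

-- ===== CLAIM (what is proved, stated in full; the proofs are below) =====
def Claim_equal_get_neighboring_states : Prop := ∀ (pos : Int × Int) (map_width : Int) (map_height : Int) (dist : Int), Dom_get_neighboring_states pos map_width map_height dist → Spec_get_neighboring_states pos map_width map_height dist (get_neighboring_states pos map_width map_height dist)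

-- ===== LEMMAS AND PROOFS =====

-- change of variable: folding a body that only uses (c + t) over range(a,b) is folding over range(c+a,c+b)
lemma foldl_pyRange_shift {β : Type} (f : β → Int → β) (a b c : Int) (init : β) :
    (PySem.List.pyRange a b 1).foldl (fun acc t => f acc (c + t)) init
      = (PySem.List.pyRange (c + a) (c + b) 1).foldl f init := by
  rw [PySem.List.pyRange_one, PySem.List.pyRange_one]
  have h : c + b - (c + a) = b - a := by ring
  rw [h]
  simp [List.foldl_map, add_assoc]

lemma filter_pyRange (a b lo hi : Int) (p : Int → Prop) [DecidablePred p]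
    (h : ∀ x, p x ↔ lo ≤ x ∧ x < hi) :
    (PySem.List.pyRange a b 1).filter (fun x => decide (p x))
      = PySem.List.pyRange (max a lo) (min b hi) 1 := by
  have hperm : (List.filter (fun x => decide (p x)) (PySem.List.pyRange a b 1)).Perm
      (PySem.List.pyRange (max a lo) (min b hi) 1) := by
    rw [List.perm_ext_iff_of_nodup ((PySem.List.nodup_pyRange_one a b).filter _)
      (PySem.List.nodup_pyRange_one _ _)]
    intro x
    simp only [List.mem_filter, PySem.List.mem_pyRange_one, decide_eq_true_eq, h]
    omega
  refine List.Perm.eq_of_pairwise (le := (· < ·))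
    (fun u v _ _ h1 h2 => absurd h2 (not_lt.mpr (le_of_lt h1))) ?_ ?_ hperm
  · exact (PySem.List.pairwise_lt_pyRange_one a b).filter _
  · exact PySem.List.pairwise_lt_pyRange_one _ _

lemma foldl_update_eq_update_flatMap {α : Type} [BEq α] (g : Int → List α) (l : List Int) (s : PySem.Set α) :
    l.foldl (fun s x => PySem.Set.update s (g x)) s = PySem.Set.update s (l.flatMap g) := by
  induction l generalizing s with
  | nil => simp [PySem.Set.update_nil]
  | cons x t ih => simp [List.foldl_cons, ih, PySem.Set.update_append]

-- inner loop of A: one row of additions is one Set.update by that row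
lemma innerA (x p2 mh d : Int) (s : PySem.Set (Int × Int)) :
    (PySem.List.pyRange (-d) (d + 1) 1).foldl (fun nb b =>
        if p2 + b < 1 ∨ mh - 1 ≤ p2 + b then nb else PySem.Set.add nb (x, p2 + b)) s
      = PySem.Set.update s ((PySem.List.pyRange (max 1 (p2 - d)) (min (mh - 2) (p2 + d) + 1) 1).map (fun y => (x, y))) := by
  have hflip : (PySem.List.pyRange (-d) (d + 1) 1).foldl (fun nb b =>
      if p2 + b < 1 ∨ mh - 1 ≤ p2 + b then nb else PySem.Set.add nb (x, p2 + b)) s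
    = (PySem.List.pyRange (-d) (d + 1) 1).foldl (fun nb b =>
      if ¬(p2 + b < 1 ∨ mh - 1 ≤ p2 + b) then PySem.Set.add nb (x, p2 + b) else nb) s := by
    apply PySem.List.foldl_congr_mem
    intro acc b _
    by_cases hc : p2 + b < 1 ∨ mh - 1 ≤ p2 + b
    · rw [if_pos hc, if_neg (not_not_intro hc)]
    · rw [if_neg hc, if_pos hc]
  rw [hflip, PySem.List.foldl_ite_eq_foldl_filter,
    filter_pyRange (-d) (d + 1) (1 - p2) (mh - 1 - p2) _ (by intro t; omega)]
  rw [foldl_pyRange_shift (fun nb y => PySem.Set.add nb (x, y)) _ _ p2 s]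
  rw [← PySem.Set.update_map_eq_foldl_add]
  have e1 : p2 + max (-d) (1 - p2) = max 1 (p2 - d) := by omega
  have e2 : p2 + min (d + 1) (mh - 1 - p2) = min (mh - 2) (p2 + d) + 1 := by omega
  rw [e1, e2]

-- A equals the set of the clamped row-major Cartesian product
lemma A_eq_prod (pos : Int × Int) (map_width map_height dist : Int) :
    get_neighboring_states pos map_width map_height dist
      = PySem.Set.ofList
          ((PySem.List.pyRange (max 1 (pos.1 - dist)) (min (map_width - 2) (pos.1 + dist) + 1) 1).flatMap
            (fun x => (PySem.List.pyRange (max 1 (pos.2 - dist)) (min (map_height - 2) (pos.2 + dist) + 1) 1).map (fun y => (x, y)))) := by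
  unfold get_neighboring_states
  simp only []
  have hflip : ∀ (acc : PySem.Set (Int × Int)) (a : Int), a ∈ PySem.List.pyRange (-dist) (dist + 1) 1 →
      (fun neighbors a =>
        if pos.1 + a < 1 ∨ map_width - 1 ≤ pos.1 + a then neighbors
        else (PySem.List.pyRange (-dist) (dist + 1) 1).foldl (fun neighbors b =>
          if pos.2 + b < 1 ∨ map_height - 1 ≤ pos.2 + b then neighbors
          else PySem.Set.add neighbors (pos.1 + a, pos.2 + b)) neighbors) acc a
      = (fun neighbors a =>
        if ¬(pos.1 + a < 1 ∨ map_width - 1 ≤ pos.1 + a) then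
          PySem.Set.update neighbors ((PySem.List.pyRange (max 1 (pos.2 - dist)) (min (map_height - 2) (pos.2 + dist) + 1) 1).map (fun y => (pos.1 + a, y)))
        else neighbors) acc a := by
    intro acc a _
    beta_reduce
    by_cases hc : pos.1 + a < 1 ∨ map_width - 1 ≤ pos.1 + a
    · rw [if_pos hc, if_neg (not_not_intro hc)]
    · rw [if_neg hc, if_pos hc, innerA]
  rw [PySem.List.foldl_congr_mem _ _ _ _ hflip, PySem.List.foldl_ite_eq_foldl_filter,
    filter_pyRange (-dist) (dist + 1) (1 - pos.1) (map_width - 1 - pos.1) _ (by intro t; omega)]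
  rw [foldl_pyRange_shift (fun nb xx => PySem.Set.update nb ((PySem.List.pyRange (max 1 (pos.2 - dist)) (min (map_height - 2) (pos.2 + dist) + 1) 1).map (fun y => (xx, y)))) _ _ pos.1 _]
  rw [foldl_update_eq_update_flatMap]
  have e1 : pos.1 + max (-dist) (1 - pos.1) = max 1 (pos.1 - dist) := by omega
  have e2 : pos.1 + min (dist + 1) (map_width - 1 - pos.1) = min (map_width - 2) (pos.1 + dist) + 1 := by omega
  rw [e1, e2]; exact PySem.Set.update_nil_left _

-- a range with a possibly-empty extent, rewritten with its clamped length
lemma pyRange_clamp (a b : Int) :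
    PySem.List.pyRange a b 1 = PySem.List.pyRange a (a + max 0 (b - a)) 1 := by
  by_cases h : a ≤ b
  · have : a + max 0 (b - a) = b := by omega
    rw [this]
  · rw [PySem.List.pyRange_one_eq_nil (by omega), PySem.List.pyRange_one_eq_nil (by omega)]

-- decoding the flat index range with divmod yields the row-major product
lemma decode_prod (x0 y0 ny : Int) (hny : 0 ≤ ny) (n : Nat) :
    (PySem.List.pyRange 0 ((n : Int) * ny) 1).map
        (fun k => (x0 + PySem.Int.floordiv k ny, y0 + PySem.Int.mod k ny))
      = (PySem.List.pyRange x0 (x0 + (n : Int)) 1).flatMap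
          (fun x => (PySem.List.pyRange y0 (y0 + ny) 1).map (fun y => (x, y))) := by
  induction n with
  | zero => simp [PySem.List.pyRange_one_eq_nil]
  | succ n ih =>
    rcases eq_or_lt_of_le hny with hzero | hpos
    · rw [← hzero]
      have h1 : (((n : Nat) + 1 : Nat) : Int) * 0 = 0 := by ring
      rw [h1, PySem.List.pyRange_one_eq_nil (le_refl (0 : Int)), add_zero,
        PySem.List.pyRange_one_eq_nil (le_refl y0)]
      simp
    · have hsplit : PySem.List.pyRange 0 (((n : Nat) + 1 : Nat) * ny) 1
          = PySem.List.pyRange 0 ((n : Int) * ny) 1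
            ++ PySem.List.pyRange ((n : Int) * ny) ((n : Int) * ny + ny) 1 := by
        have h1 : (0 : Int) ≤ (n : Int) * ny := by positivity
        have h2 : (((n : Nat) + 1 : Nat) : Int) * ny = (n : Int) * ny + ny := by push_cast; ring
        rw [h2, PySem.List.pyRange_one_append 0 ((n : Int) * ny) ((n : Int) * ny + ny) h1 (by omega)]
      have hxs : PySem.List.pyRange x0 (x0 + (((n : Nat) + 1 : Nat) : Int)) 1
          = PySem.List.pyRange x0 (x0 + (n : Int)) 1 ++ [x0 + (n : Int)] := by
        have h2 : x0 + (((n : Nat) + 1 : Nat) : Int) = (x0 + (n : Int)) + 1 := by push_cast; ring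
        rw [h2, PySem.List.pyRange_one_succ_right (by omega)]
      rw [hsplit, List.map_append, hxs, List.flatMap_append, ih]
      congr 1
      -- the tail block decodes to the last row
      rw [List.flatMap_singleton]
      rw [PySem.List.pyRange_one ((n : Int) * ny) ((n : Int) * ny + ny),
        PySem.List.pyRange_one y0 (y0 + ny)]
      have hlen : ((n : Int) * ny + ny - (n : Int) * ny) = (y0 + ny - y0) := by ring
      rw [hlen, List.map_map, List.map_map]
      apply List.map_congr_left
      intro k hk
      simp only [List.mem_range] at hk
      have hkny : (k : Int) < ny := by
        have := hk
        omega
      have hdiv : PySem.Int.floordiv ((n : Int) * ny + (k : Int)) ny = (n : Int) := by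
        rw [PySem.Int.floordiv_eq_iff_of_pos hpos]
        constructor <;> nlinarith [Int.natCast_nonneg k]
      have hmod : PySem.Int.mod ((n : Int) * ny + (k : Int)) ny = (k : Int) := by
        have := PySem.Int.floordiv_mul_add_mod ((n : Int) * ny + (k : Int)) ny
        rw [hdiv] at this
        omega
      simp only [Function.comp, hdiv, hmod]

lemma get_neighboring_states_eq (pos : Int × Int) (map_width map_height dist : Int) :
    get_neighboring_states pos map_width map_height dist
      = get_neighboring_states_alt pos map_width map_height dist := by
  rw [A_eq_prod]
  unfold get_neighboring_states_alt
  simp only []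
  set x0 := max 1 (pos.1 - dist) with hx0
  set y0 := max 1 (pos.2 - dist) with hy0
  set nx := max 0 (min (map_width - 2) (pos.1 + dist) - x0 + 1) with hnx
  set ny := max 0 (min (map_height - 2) (pos.2 + dist) - y0 + 1) with hny
  have hxclamp : PySem.List.pyRange x0 (min (map_width - 2) (pos.1 + dist) + 1) 1
      = PySem.List.pyRange x0 (x0 + nx) 1 := by
    rw [pyRange_clamp x0 (min (map_width - 2) (pos.1 + dist) + 1)]
    congr 1; omega
  have hyclamp : PySem.List.pyRange y0 (min (map_height - 2) (pos.2 + dist) + 1) 1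
      = PySem.List.pyRange y0 (y0 + ny) 1 := by
    rw [pyRange_clamp y0 (min (map_height - 2) (pos.2 + dist) + 1)]
    congr 1; omega
  rw [hxclamp, hyclamp]
  have hnx0 : 0 ≤ nx := by omega
  have hny0 : 0 ≤ ny := by omega
  have hcast : nx = ((nx.toNat : Nat) : Int) := by omega
  rw [hcast, decode_prod x0 y0 ny hny0 nx.toNat]

-- ===== VERDICT (by name: the statement is the Claim_ definition above) =====
theorem get_neighboring_states_spec : Claim_equal_get_neighboring_states := by
  intro pos map_width map_height dist _
  show get_neighboring_states pos map_width map_height dist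
      = get_neighboring_states_alt pos map_width map_height dist
  exact get_neighboring_states_eq pos map_width map_height dist
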